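-- pv_equiv track=rewrite | github.com/albertintech/Python_3_Programming_Specialization | Course_2/week4/while_loop/assessment/6.py | beginning
-- ===== SOURCE A (Python) =====
-- def beginning(lst):
--     sublst = []
--     n = 0
--     while n < len(lst) and n < 10:
--         if lst[n] == "bye":
--             break
--         else:
--             sublst.append(lst[n])
--         n += 1
--     return sublst
-- ===== SOURCE B (Python) =====
-- def beginning(lst):
--     head = lst[:10]
--     if "bye" in head:
--         return head[:head.index("bye")]
--     return head
-- ===== Notes on version B (the rewrite author's own statement) =====
-- stated objective: simpler
-- what changed: B slices the first 10 elements once and cuts at the position of 'bye' found by membership+index, instead of A's counter-driven accumulate-and-break while loop.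
import Mathlib
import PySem

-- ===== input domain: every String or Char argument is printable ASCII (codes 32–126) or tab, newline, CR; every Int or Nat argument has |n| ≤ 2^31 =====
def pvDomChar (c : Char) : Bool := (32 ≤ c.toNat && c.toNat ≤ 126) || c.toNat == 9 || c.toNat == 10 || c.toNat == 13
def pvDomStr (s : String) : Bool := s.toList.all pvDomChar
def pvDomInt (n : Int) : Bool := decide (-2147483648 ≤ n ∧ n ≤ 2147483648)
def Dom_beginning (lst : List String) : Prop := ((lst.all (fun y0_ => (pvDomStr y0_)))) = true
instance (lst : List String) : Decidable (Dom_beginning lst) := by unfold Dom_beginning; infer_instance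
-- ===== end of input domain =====

-- B replaces A's counter-driven accumulate-and-break while loop by slicing the first 10
-- elements once and cutting at the index of "bye" (simpler decomposition; same cost).

-- ===== PORT A =====
-- while n < len(lst) and n < 10: break on "bye", else append lst[n]; n += 1
def beginningGo (lst : List String) (sublst : List String) (n : Nat) : List String :=
  if h : n < lst.length ∧ n < 10 then
    if lst[n]'h.1 = "bye" then sublst
    else beginningGo lst (sublst ++ [lst[n]'h.1]) (n + 1)
  else sublst
termination_by 10 - n

def beginning (lst : List String) : List String := beginningGo lst [] 0

-- ===== PORT B =====
def beginning_alt (lst : List String) : List String :=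
  let head := PySem.List.slice lst none (some 10)
  if head.contains "bye" then
    match PySem.List.index? head "bye" with
    | some k => PySem.List.slice head none (some (k : Int))
    | none => head
  else head

-- ===== PRECONDITION & SPEC =====
def Spec_beginning (lst : List String) (out : List String) : Prop := out = beginning_alt lst
instance (lst : List String) (out : List String) : Decidable (Spec_beginning lst out) := by unfold Spec_beginning; infer_instance

-- ===== CLAIM (what is proved, stated in full; the proofs are below) =====
def Claim_equal_beginning : Prop := ∀ (lst : List String), Dom_beginning lst → Spec_beginning lst (beginning lst)

-- ===== LEMMAS AND PROOFS =====

-- characterisation: elements up to the first "bye"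
def cutBye : List String → List String
  | [] => []
  | x :: xs => if x = "bye" then [] else x :: cutBye xs

theorem cutBye_of_not_mem (l : List String) (h : "bye" ∉ l) : cutBye l = l := by
  induction l with
  | nil => rfl
  | cons x xs ih =>
    simp only [List.mem_cons, not_or] at h
    simp [cutBye, Ne.symm h.1, ih h.2]

theorem cut_head (head : List String) :
    (if head.contains "bye" then
      match PySem.List.index? head "bye" with
      | some k => PySem.List.slice head none (some (k : Int))
      | none => head
    else head) = cutBye head := by
  induction head with
  | nil => rfl
  | cons x xs ih =>
    by_cases hx : x = "bye"
    · subst hx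
      have hc : ("bye" :: xs).contains "bye" = true := by simp
      rw [if_pos hc, PySem.List.index?_cons_self]
      show PySem.List.slice ("bye" :: xs) none (some ((0 : Nat) : Int)) = _
      rw [PySem.List.slice_to_natCast]
      simp [cutBye]
    · rw [PySem.List.index?_cons_of_ne xs (by exact hx)]
      by_cases hm : "bye" ∈ xs
      · obtain ⟨j, hj⟩ := Option.isSome_iff_exists.mp
          ((PySem.List.index?_isSome_iff xs "bye").mpr hm)
        have hc : xs.contains "bye" = true := by simpa using hm
        have hcx : (x :: xs).contains "bye" = true := by simp [hm]
        have ih' : List.take j xs = cutBye xs := by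
          rw [if_pos hc, hj] at ih
          rw [← PySem.List.slice_to_natCast xs j]
          exact ih
        rw [if_pos hcx, hj]
        show PySem.List.slice (x :: xs) none (some ((j + 1 : Nat) : Int)) = _
        rw [PySem.List.slice_to_natCast, List.take_succ_cons]
        simp [cutBye, hx, ih']
      · have hcx : ¬ ((x :: xs).contains "bye" = true) := by
          simp
          exact ⟨fun h => hx h.symm, hm⟩
        rw [if_neg hcx]
        simp [cutBye, hx, cutBye_of_not_mem xs hm]

theorem alt_eq_cutBye (lst : List String) :
    beginning_alt lst = cutBye (lst.take 10) := by
  have hs : PySem.List.slice lst none (some 10) = lst.take 10 :=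
    PySem.List.slice_to lst (b := 10) (by norm_num)
  unfold beginning_alt
  rw [hs, cut_head]

-- loop invariant for A's while loop
theorem go_eq (k : Nat) : ∀ (n : Nat), 10 - n = k → ∀ (lst sublst : List String),
    beginningGo lst sublst n = sublst ++ cutBye ((lst.drop n).take k) := by
  induction k with
  | zero =>
    intro n hn lst sublst
    unfold beginningGo
    have : ¬ (n < lst.length ∧ n < 10) := by omega
    simp [this, cutBye]
  | succ k ih =>
    intro n hn lst sublst
    unfold beginningGo
    by_cases hlen : n < lst.length
    · have hd : lst.drop n = lst[n] :: lst.drop (n + 1) :=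
        List.drop_eq_getElem_cons hlen
      have hcond : n < lst.length ∧ n < 10 := ⟨hlen, by omega⟩
      rw [dif_pos hcond, hd, List.take_succ_cons]
      by_cases hb : lst[n] = "bye"
      · simp [hb, cutBye]
      · rw [if_neg hb, ih (n + 1) (by omega) lst (sublst ++ [lst[n]]),
          List.append_assoc]
        simp [cutBye, hb]
    · have hc : ¬ (n < lst.length ∧ n < 10) := by tauto
      rw [dif_neg hc]
      have : lst.drop n = [] := List.drop_eq_nil_of_le (by omega)
      simp [this, cutBye]

-- ===== VERDICT (by name: the statement is the Claim_ definition above) =====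
theorem beginning_spec : Claim_equal_beginning := by
  intro lst _
  unfold Spec_beginning beginning
  rw [go_eq 10 0 rfl lst [], alt_eq_cutBye]
  simp
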